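-- pv_equiv track=rewrite | github.com/microsoft/knowledge-extraction-recipes-forms | common/common.py | find_runs
-- ===== SOURCE A (Python) =====
-- def find_runs(sum_rows, level=0):
--     """
--     Identify sequence of rows where the sum is high.
--     This indicates existence of text (where the sum is above level)
--     Do the same for sequences where the sum is low
--     This indicates a line break - the abscence of text
--     """
--     lows = []
--     highs = []
--     num_rows = len(sum_rows)
--     old_low_high = -1
--     curr_run = []
--
--     for pos in range(num_rows):
--
--         if sum_rows[pos] <= level:
--             low_high = 0
--         else:
--             low_high = 1
--
--         if old_low_high == -1:
--             old_low_high = low_high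
--             curr_run.append(pos)
--             continue
--
--         if old_low_high != low_high:
--             # new run
--             if old_low_high == 0:
--                 lows.append(curr_run)
--             else:
--                 highs.append(curr_run)
--
--             old_low_high = low_high
--             curr_run = []
--
--         curr_run.append(pos)
--
--     return lows, highs
-- ===== SOURCE B (Python) =====
-- def find_runs(sum_rows, level=0):
--     # Boundary-based reconstruction: find the cut positions where the low/high
--     # label flips, then rebuild each run arithmetically as range(start, end)
--     # from consecutive cut positions; the trailing interval has no closing cut,
--     # so (as in the original) it is never emitted.
--     n = len(sum_rows)
--     labels = [x <= level for x in sum_rows]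
--     cuts = [i for i in range(1, n) if labels[i] != labels[i - 1]]
--     lows = []
--     highs = []
--     for start, end in zip([0] + cuts, cuts):
--         run = list(range(start, end))
--         (lows if labels[start] else highs).append(run)
--     return lows, highs
-- ===== Notes on version B (the rewrite author's own statement) =====
-- stated objective: alternative
-- what changed: A detects label transitions while incrementally accumulating the current run and flushing it into lows/highs; B never accumulates runs element by element: it computes the list of cut positions where the low/high label flips and then reconstructs each run arithmetically as list(range(start, end)) from consecutive cut positions, dispatching by the label at the run's start (the trailing interval has no closing cut, so it is never emitted, matching A's discard of the final run).
import Mathlib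
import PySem

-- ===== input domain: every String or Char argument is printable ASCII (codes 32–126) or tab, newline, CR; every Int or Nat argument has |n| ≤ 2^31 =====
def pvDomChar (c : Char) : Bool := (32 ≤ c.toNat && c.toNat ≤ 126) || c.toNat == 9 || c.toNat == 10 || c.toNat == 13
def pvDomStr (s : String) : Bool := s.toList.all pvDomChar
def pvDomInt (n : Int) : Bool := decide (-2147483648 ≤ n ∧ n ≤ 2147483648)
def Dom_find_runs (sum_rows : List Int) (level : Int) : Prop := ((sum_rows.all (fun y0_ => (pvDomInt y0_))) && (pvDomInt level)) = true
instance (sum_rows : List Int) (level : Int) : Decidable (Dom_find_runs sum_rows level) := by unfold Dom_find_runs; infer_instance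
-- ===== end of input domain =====

-- B replaces A's incremental transition-detecting loop by a boundary computation: it finds the
-- cut positions where the low/high label flips and rebuilds each run as range(start, end) from
-- consecutive cuts (alternative decomposition, same value everywhere).

-- ===== PORT A =====
-- loop body of A: state = ((lows, highs), old_low_high, curr_run)
def pvStepA (sum_rows : List Int) (level : Int)
    (st : (List (List Int) × List (List Int)) × Int × List Int) (pos : Int) :
    (List (List Int) × List (List Int)) × Int × List Int :=
  let lh : Int := if PySem.List.pyGetD sum_rows pos 0 ≤ level then 0 else 1
  if st.2.1 = -1 then (st.1, lh, st.2.2 ++ [pos])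
  else if st.2.1 ≠ lh then
    ((if st.2.1 = 0 then (st.1.1 ++ [st.2.2], st.1.2) else (st.1.1, st.1.2 ++ [st.2.2])), lh, [pos])
  else (st.1, st.2.1, st.2.2 ++ [pos])

def find_runs (sum_rows : List Int) (level : Int) : List (List Int) × List (List Int) :=
  ((PySem.List.pyRange 0 (PySem.List.len sum_rows) 1).foldl (pvStepA sum_rows level)
    (([], []), -1, [])).1

-- ===== PORT B =====
-- labels[i] / labels[i-1] / labels[start] are always accessed in range (1 ≤ i < n, start < n),
-- where pyGetD with any default is exact
def find_runs_alt (sum_rows : List Int) (level : Int) : List (List Int) × List (List Int) :=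
  let n := PySem.List.len sum_rows
  let labels := sum_rows.map (fun x => decide (x ≤ level))
  let cuts := (PySem.List.pyRange 1 n 1).filter
      (fun i => PySem.List.pyGetD labels i false != PySem.List.pyGetD labels (i - 1) false)
  (List.zip ((0:Int) :: cuts) cuts).foldl
    (fun acc p =>
      let run := PySem.List.pyRange p.1 p.2 1
      if PySem.List.pyGetD labels p.1 false then (acc.1 ++ [run], acc.2)
      else (acc.1, acc.2 ++ [run]))
    ([], [])

-- ===== PRECONDITION & SPEC =====
def Spec_find_runs (sum_rows : List Int) (level : Int) (out : List (List Int) × List (List Int)) : Prop := out = find_runs_alt sum_rows level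
instance (sum_rows : List Int) (level : Int) (out : List (List Int) × List (List Int)) : Decidable (Spec_find_runs sum_rows level out) := by unfold Spec_find_runs; infer_instance

-- ===== CLAIM (what is proved, stated in full; the proofs are below) =====
def Claim_equal_find_runs : Prop := ∀ (sum_rows : List Int) (level : Int), Dom_find_runs sum_rows level → Spec_find_runs sum_rows level (find_runs sum_rows level)

-- ===== LEMMAS AND PROOFS =====

-- the low/high label of position i (true = low), read the way A reads it
def pvL (sum_rows : List Int) (level : Int) (i : Int) : Bool :=
  decide (PySem.List.pyGetD sum_rows i 0 ≤ level)

-- cut positions below m, phrased with pvL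
def pvCuts (sum_rows : List Int) (level : Int) (m : Int) : List Int :=
  (PySem.List.pyRange 1 m 1).filter
    (fun i => pvL sum_rows level i != pvL sum_rows level (i - 1))

-- B's dispatch step, phrased with pvL
def pvStep2 (sum_rows : List Int) (level : Int)
    (acc : List (List Int) × List (List Int)) (p : Int × Int) :
    List (List Int) × List (List Int) :=
  if pvL sum_rows level p.1 then (acc.1 ++ [PySem.List.pyRange p.1 p.2 1], acc.2)
  else (acc.1, acc.2 ++ [PySem.List.pyRange p.1 p.2 1])

def pvP (sum_rows : List Int) (level : Int) (c : List Int) :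
    List (List Int) × List (List Int) :=
  (List.zip ((0:Int) :: c) c).foldl (pvStep2 sum_rows level) ([], [])

lemma pv_zip_concat {m : Int} (c : List Int) (a : Int) :
    List.zip (a :: (c ++ [m])) (c ++ [m])
      = List.zip (a :: c) c ++ [(c.getLastD a, m)] := by
  induction c generalizing a with
  | nil => rfl
  | cons b c' ih =>
    simp only [List.cons_append, List.zip_cons_cons, ih b, List.getLastD_cons]

lemma pv_P_concat (sum_rows : List Int) (level : Int) (c : List Int) (m : Int) :
    pvP sum_rows level (c ++ [m])
      = pvStep2 sum_rows level (pvP sum_rows level c) (c.getLastD 0, m) := by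
  unfold pvP
  rw [pv_zip_concat c 0, List.foldl_append]
  rfl

-- main invariant of A's loop, in terms of the cuts below the current position
lemma pv_main (sum_rows : List Int) (level : Int) :
    ∀ m : Int, 1 ≤ m →
      (PySem.List.pyRange 0 m 1).foldl (pvStepA sum_rows level) (([], []), -1, [])
        = (pvP sum_rows level (pvCuts sum_rows level m),
           (if pvL sum_rows level (m - 1) then (0:Int) else 1),
           PySem.List.pyRange ((pvCuts sum_rows level m).getLastD 0) m 1)
      ∧ pvL sum_rows level ((pvCuts sum_rows level m).getLastD 0) = pvL sum_rows level (m - 1)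
      ∧ 0 ≤ (pvCuts sum_rows level m).getLastD 0
      ∧ (pvCuts sum_rows level m).getLastD 0 < m := by
  intro m hm
  have hm' : ∃ k : Nat, m = 1 + (k : Int) := ⟨(m - 1).toNat, by omega⟩
  obtain ⟨k, rfl⟩ := hm'
  clear hm
  induction k with
  | zero =>
    have h1 : PySem.List.pyRange 0 1 1 = [(0:Int)] := by decide
    have h2 : pvCuts sum_rows level 1 = [] := by
      unfold pvCuts
      rw [PySem.List.pyRange_one_eq_nil (by omega)]
      rfl
    refine ⟨?_, by simp [h2], by simp [h2], by simp [h2]⟩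
    rw [show ((1:Int) + (0:Nat)) = 1 by norm_num, h1, h2]
    by_cases h : PySem.List.pyGetD sum_rows 0 0 ≤ level <;>
      simp [pvStepA, pvP, pvL, h, h1]
  | succ k ih =>
    obtain ⟨hst, hlab, hge, hlt⟩ := ih
    set m : Int := 1 + (k : Int) with hmdef
    rw [show (1 + ((k+1 : Nat) : Int)) = m + 1 by push_cast; omega]
    have hrange : PySem.List.pyRange 0 (m + 1) 1 = PySem.List.pyRange 0 m 1 ++ [m] :=
      PySem.List.pyRange_one_succ_right (by omega)
    have hcutrange : PySem.List.pyRange 1 (m + 1) 1 = PySem.List.pyRange 1 m 1 ++ [m] :=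
      PySem.List.pyRange_one_succ_right (by omega)
    rw [hrange, List.foldl_append, hst]
    have hmm : m + 1 - 1 = m := by omega
    by_cases hbm : pvL sum_rows level m = pvL sum_rows level (m - 1)
    · -- label unchanged: run extends, no new cut
      have hcuts : pvCuts sum_rows level (m + 1) = pvCuts sum_rows level m := by
        unfold pvCuts
        rw [hcutrange, List.filter_append]
        simp [hbm]
      have hext : PySem.List.pyRange ((pvCuts sum_rows level m).getLastD 0) m 1 ++ [m]
          = PySem.List.pyRange ((pvCuts sum_rows level m).getLastD 0) (m + 1) 1 :=
        (PySem.List.pyRange_one_succ_right (by omega)).symm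
      simp only [hcuts, hmm]
      refine ⟨?_, hlab.trans hbm.symm, hge, by omega⟩
      cases hL : pvL sum_rows level m with
      | true =>
        have hL' := hbm ▸ hL
        have hx : PySem.List.pyGetD sum_rows m 0 ≤ level := by
          simpa [pvL] using hL
        simp [pvStepA, hL', hx, - List.getLastD_eq_getLast?, hext]
      | false =>
        have hL' := hbm ▸ hL
        have hx : ¬ PySem.List.pyGetD sum_rows m 0 ≤ level := by
          simpa [pvL] using hL
        simp [pvStepA, hL', hx, - List.getLastD_eq_getLast?, hext]
    · -- label flips: cut at m, run (start, m) is dispatched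
      have hcuts : pvCuts sum_rows level (m + 1) = pvCuts sum_rows level m ++ [m] := by
        unfold pvCuts
        rw [hcutrange, List.filter_append]
        have h : (pvL sum_rows level m != pvL sum_rows level (m - 1)) = true := by
          simpa using hbm
        simp [h]
      simp only [hcuts, hmm, List.getLastD_concat]
      refine ⟨?_, trivial, by omega, by omega⟩
      rw [pv_P_concat]
      cases hL : pvL sum_rows level m with
      | true =>
        have hL' : pvL sum_rows level (m-1) = false := by
          cases h : pvL sum_rows level (m-1) <;> simp_all
        have hx : PySem.List.pyGetD sum_rows m 0 ≤ level := by
          simpa [pvL] using hL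
        have hs : pvL sum_rows level ((pvCuts sum_rows level m).getLastD 0) = false :=
          hlab.trans hL'
        simp [pvStepA, pvStep2, hL', hx, - List.getLastD_eq_getLast?, hs, PySem.List.pyRange_one_singleton]
      | false =>
        have hL' : pvL sum_rows level (m-1) = true := by
          cases h : pvL sum_rows level (m-1) <;> simp_all
        have hx : ¬ PySem.List.pyGetD sum_rows m 0 ≤ level := by
          simpa [pvL] using hL
        have hs : pvL sum_rows level ((pvCuts sum_rows level m).getLastD 0) = true :=
          hlab.trans hL'
        simp [pvStepA, pvStep2, hL', hx, - List.getLastD_eq_getLast?, hs, PySem.List.pyRange_one_singleton]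

-- B's in-range reads of the labels list are pvL
lemma pv_labels_eq (sum_rows : List Int) (level : Int) (i : Int)
    (h0 : 0 ≤ i) (h1 : i < (sum_rows.length : Int)) :
    PySem.List.pyGetD (sum_rows.map (fun x => decide (x ≤ level))) i false
      = pvL sum_rows level i := by
  rw [PySem.List.pyGetD_eq_getElem _ _ h0 (by simpa using h1)]
  unfold pvL
  rw [PySem.List.pyGetD_eq_getElem _ _ h0 (by exact_mod_cast h1)]
  simp

-- B's cuts, computed through the labels list, are pvCuts at n
lemma pv_cuts_eq (sum_rows : List Int) (level : Int) :
    ((PySem.List.pyRange 1 (PySem.List.len sum_rows) 1).filter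
      (fun i => PySem.List.pyGetD (sum_rows.map (fun x => decide (x ≤ level))) i false
             != PySem.List.pyGetD (sum_rows.map (fun x => decide (x ≤ level))) (i - 1) false))
      = pvCuts sum_rows level (PySem.List.len sum_rows) := by
  unfold pvCuts
  apply List.filter_congr
  intro i hi
  rw [PySem.List.mem_pyRange_one] at hi
  have hlen : PySem.List.len sum_rows = (sum_rows.length : Int) := by
    simp [PySem.List.len]
  rw [pv_labels_eq sum_rows level i (by omega) (by omega),
      pv_labels_eq sum_rows level (i - 1) (by omega) (by omega)]

-- B's dispatch loop agrees with pvStep2 on the pairs it actually visits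
lemma pv_fold_eq (sum_rows : List Int) (level : Int) (c : List Int)
    (hc : ∀ x ∈ c, 0 ≤ x ∧ x < (sum_rows.length : Int))
    (hn : 0 < sum_rows.length) :
    (List.zip ((0:Int) :: c) c).foldl
      (fun acc p =>
        let run := PySem.List.pyRange p.1 p.2 1
        if PySem.List.pyGetD (sum_rows.map (fun x => decide (x ≤ level))) p.1 false
        then (acc.1 ++ [run], acc.2) else (acc.1, acc.2 ++ [run]))
      ([], [])
      = pvP sum_rows level c := by
  unfold pvP
  apply PySem.List.foldl_congr_mem
  intro acc p hp
  obtain ⟨a, b⟩ := p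
  have hp1 : a ∈ (0:Int) :: c := (List.of_mem_zip hp).1
  have hb : 0 ≤ a ∧ a < (sum_rows.length : Int) := by
    rcases List.mem_cons.mp hp1 with h | h
    · refine ⟨by omega, ?_⟩
      rw [h]
      exact_mod_cast hn
    · exact hc _ h
  simp only [pvStep2, pv_labels_eq sum_rows level a hb.1 hb.2]

-- ===== VERDICT (by name: the statement is the Claim_ definition above) =====
theorem find_runs_spec : Claim_equal_find_runs := by
  intro sum_rows level _
  unfold Spec_find_runs
  cases hsr : sum_rows with
  | nil => rfl
  | cons x xs =>
    rw [← hsr]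
    have hlen : PySem.List.len sum_rows = (sum_rows.length : Int) := by
      simp [PySem.List.len]
    have hn : 0 < sum_rows.length := by rw [hsr]; simp
    have hn1 : (1:Int) ≤ (sum_rows.length : Int) := by exact_mod_cast hn
    obtain ⟨hst, -, -, -⟩ := pv_main sum_rows level (sum_rows.length : Int) hn1
    have hcmem : ∀ x ∈ pvCuts sum_rows level (sum_rows.length : Int),
        0 ≤ x ∧ x < (sum_rows.length : Int) := by
      intro x hx
      unfold pvCuts at hx
      have := (List.mem_filter.mp hx).1
      rw [PySem.List.mem_pyRange_one] at this
      omega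
    have hA : find_runs sum_rows level
        = pvP sum_rows level (pvCuts sum_rows level (sum_rows.length : Int)) := by
      unfold find_runs
      rw [hlen, hst]
    have hB : find_runs_alt sum_rows level
        = pvP sum_rows level (pvCuts sum_rows level (sum_rows.length : Int)) := by
      simp only [find_runs_alt]
      rw [pv_cuts_eq sum_rows level, hlen]
      exact pv_fold_eq sum_rows level _ hcmem hn
    rw [hA, hB]
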